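-- pv_equiv track=rewrite | github.com/MrBrantCode/unitest_baseline | mut_generate/mist_train_taco/taco_17914/solution.py | find_prime_neighbors
-- ===== SOURCE A (Python) =====
-- def is_prime(a):
--     if a < 2:
--         return False
--     if a == 2 or a == 3:
--         return True
--     if a % 2 == 0 or a % 3 == 0:
--         return False
--     max_divisor = int(a ** 0.5)
--     (d, i) = (5, 2)
--     while d <= max_divisor:
--         if a % d == 0:
--             return False
--         d += i
--         i = 6 - i
--     return True
--
-- def find_prime_neighbors(n):
--     bef_prime = None
--     aft_prime = None
--
--     # Find the largest prime below n
--     for num in range(n - 1, 1, -1):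
--         if is_prime(num):
--             bef_prime = num
--             break
--
--     # Find the smallest prime above n
--     for num in range(n + 1, 3 * n):
--         if is_prime(num):
--             aft_prime = num
--             break
--
--     return [bef_prime, aft_prime]
-- ===== SOURCE B (Python) =====
-- def find_prime_neighbors(n):
--     # Windowed sieve of Eratosthenes: mark multiples inside 1024-wide windows,
--     # walking down from n for the predecessor and up from n (below 3*n) for the
--     # successor, instead of trial-dividing each candidate.
--     W = 1024
--
--     def window_flags(lo, hi):
--         # flags[m - lo] for m in [lo, hi): True iff m is prime; mark, for every
--         # trial divisor d with d*d < hi, the multiples m of d with d*d <= m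
--         flags = [m >= 2 for m in range(lo, hi)]
--         d = 2
--         while d * d < hi:
--             start = max(d * d, ((lo + d - 1) // d) * d)
--             for m in range(start, hi, d):
--                 flags[m - lo] = False
--             d += 1
--         return flags
--
--     bef_prime = None
--     hi = n
--     while bef_prime is None and hi > 2:
--         lo = max(2, hi - W)
--         flags = window_flags(lo, hi)
--         for m in range(hi - 1, lo - 1, -1):
--             if flags[m - lo]:
--                 bef_prime = m
--                 break
--         hi = lo
--
--     aft_prime = None
--     lo = n + 1
--     while aft_prime is None and lo < 3 * n:
--         hi = min(3 * n, lo + W)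
--         flags = window_flags(lo, hi)
--         for m in range(lo, hi):
--             if flags[m - lo]:
--                 aft_prime = m
--                 break
--         lo = hi
--
--     return [bef_prime, aft_prime]
-- ===== Notes on version B (the rewrite author's own statement) =====
-- stated objective: alternative
-- what changed: A trial-divides every scanned candidate with a wheel up to its square root; B instead sieves fixed-width windows (marking the in-window multiples of each trial divisor once per window), walking downward from n for the predecessor and upward below the same exclusive bound for the successor, and takes the first surviving index.
import Mathlib
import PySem

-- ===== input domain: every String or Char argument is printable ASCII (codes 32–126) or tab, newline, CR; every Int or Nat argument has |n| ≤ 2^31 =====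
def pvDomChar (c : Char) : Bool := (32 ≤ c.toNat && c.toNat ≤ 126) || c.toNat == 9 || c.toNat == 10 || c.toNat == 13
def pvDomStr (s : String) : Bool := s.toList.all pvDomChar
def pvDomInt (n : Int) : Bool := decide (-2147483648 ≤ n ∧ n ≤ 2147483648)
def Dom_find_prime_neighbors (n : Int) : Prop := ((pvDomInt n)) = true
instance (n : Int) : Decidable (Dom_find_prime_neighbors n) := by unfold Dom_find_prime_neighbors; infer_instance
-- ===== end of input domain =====

-- B replaces A's per-candidate wheel trial division on two linear scans by a
-- windowed sieve: it marks composites inside fixed-width windows walking down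
-- from n and up below the same exclusive bound A uses, and returns the first
-- surviving index of each walk (objective: alternative algorithm, not claimed faster).

-- ===== PORT A =====
-- the while loop of is_prime: (d, i) walks 5, 7, 11, 13, … while d <= max_divisor;
-- fuel = max_divisor.toNat + 1 is enough since d grows by at least 2 each step,
-- and when fuel runs out the guard d ≤ maxd is already false, so `true` is returned either way
def is_prime_loop (a maxd d i : Int) : Nat → Bool
  | 0 => true
  | fuel + 1 =>
    if d ≤ maxd then
      if PySem.Int.mod a d = 0 then false
      else is_prime_loop a maxd (d + i) (6 - i) fuel
    else true

def is_prime (a : Int) : Bool :=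
  if a < 2 then false
  else if a = 2 || a = 3 then true
  else if PySem.Int.mod a 2 = 0 || PySem.Int.mod a 3 = 0 then false
  else
    -- int(a ** 0.5): ported as the integer square root, which is exactly what the
    -- float expression yields for every a reachable here (a ≤ 3·2^31 < 2^53)
    let maxd : Int := (Nat.sqrt a.toNat : Int)
    is_prime_loop a maxd 5 2 (maxd.toNat + 1)

-- `for num in range(n - 1, 1, -1): if is_prime(num): …; break` as a counting loop
-- (the range is walked lazily, like Python's; fuel = the range's length)
def scan_down (num : Int) : Nat → Option Int
  | 0 => none
  | fuel + 1 => if is_prime num then some num else scan_down (num - 1) fuel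

-- `for num in range(n + 1, 3 * n): if is_prime(num): …; break`, likewise
def scan_up (num : Int) : Nat → Option Int
  | 0 => none
  | fuel + 1 => if is_prime num then some num else scan_up (num + 1) fuel

def find_prime_neighbors (n : Int) : List (Option Int) :=
  let bef_prime := scan_down (n - 1) ((n - 1 - 1).toNat)
  let aft_prime := scan_up (n + 1) ((3 * n - (n + 1)).toNat)
  [bef_prime, aft_prime]

-- ===== PORT B =====
-- flags = [m >= 2 for m in range(lo, hi)]
def window_init (lo hi : Int) : Array Bool :=
  ((PySem.List.pyRange lo hi 1).map (fun m => decide (2 ≤ m))).toArray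

-- for m in range(start, hi, d): flags[m - lo] = False
def window_mark (lo : Int) (arr : Array Bool) (ms : List Int) : Array Bool :=
  ms.foldl (fun acc m => acc.setIfInBounds (m - lo).toNat false) arr

-- while d * d < hi: …; d += 1  — fuel = hi.toNat suffices (d starts at 2 and grows
-- by 1; at exhaustion d ≥ hi, so the guard is false, which is also what fuel 0 returns);
-- start = max(d*d, ((lo + d - 1) // d) * d) is inlined in the marked range
def window_loop (lo hi : Int) (d : Int) (arr : Array Bool) : Nat → Array Bool
  | 0 => arr
  | fuel + 1 =>
    if d * d < hi then
      window_loop lo hi (d + 1)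
        (window_mark lo arr
          (PySem.List.pyRange (max (d * d) (PySem.Int.floordiv (lo + d - 1) d * d)) hi d)) fuel
    else arr

def window_flags (lo hi : Int) : Array Bool :=
  window_loop lo hi 2 (window_init lo hi) hi.toNat

-- while bef_prime is None and hi > 2: …  — each round lowers hi by at least 1, so
-- fuel = n.toNat suffices (at exhaustion hi ≤ 2, which is also what fuel 0 returns);
-- lo = max(2, hi - W) is inlined
def bef_loop (W : Int) (hi : Int) : Nat → Option Int
  | 0 => none
  | fuel + 1 =>
    if 2 < hi then
      match (PySem.List.pyRange (hi - 1) (max 2 (hi - W) - 1) (-1)).find?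
          (fun m => (window_flags (max 2 (hi - W)) hi).getD (m - max 2 (hi - W)).toNat false) with
      | some m => some m
      | none => bef_loop W (max 2 (hi - W)) fuel
    else none

-- while aft_prime is None and lo < 3 * n: … likewise (each round raises lo by at
-- least 1); hi = min(3 * n, lo + W) is inlined
def aft_loop (W bound : Int) (lo : Int) : Nat → Option Int
  | 0 => none
  | fuel + 1 =>
    if lo < bound then
      match (PySem.List.pyRange lo (min bound (lo + W)) 1).find?
          (fun m => (window_flags lo (min bound (lo + W))).getD (m - lo).toNat false) with
      | some m => some m
      | none => aft_loop W bound (min bound (lo + W)) fuel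
    else none

def find_prime_neighbors_alt (n : Int) : List (Option Int) :=
  let bef_prime := bef_loop 1024 n n.toNat
  let aft_prime := aft_loop 1024 (3 * n) (n + 1) (3 * n).toNat
  [bef_prime, aft_prime]

-- ===== PRECONDITION & SPEC =====
def Spec_find_prime_neighbors (n : Int) (out : List (Option Int)) : Prop := out = find_prime_neighbors_alt n
instance (n : Int) (out : List (Option Int)) : Decidable (Spec_find_prime_neighbors n out) := by unfold Spec_find_prime_neighbors; infer_instance

-- ===== CLAIM (what is proved, stated in full; the proofs are below) =====
def Claim_equal_find_prime_neighbors : Prop := ∀ (n : Int), Dom_find_prime_neighbors n → Spec_find_prime_neighbors n (find_prime_neighbors n)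

-- ===== LEMMAS AND PROOFS =====

-- ---- A side: the wheel test decides primality ----

theorem is_prime_loop_char (a : Int) (maxd : Int) :
    ∀ (fuel : Nat) (d i : Int), (d % 6 = 5 ∧ i = 2 ∨ d % 6 = 1 ∧ i = 4) →
    maxd + 1 - d ≤ 2 * fuel →
    (is_prime_loop a maxd d i fuel = true ↔
      ∀ m : Int, d ≤ m → m ≤ maxd → (m % 6 = 1 ∨ m % 6 = 5) → ¬ (m ∣ a)) := by
  intro fuel
  induction fuel with
  | zero =>
    intro d i _ hfuel
    simp only [is_prime_loop, true_iff]
    intro m hdm hmmax _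
    omega
  | succ fuel ih =>
    intro d i hstate hfuel
    by_cases hd : d ≤ maxd
    · by_cases hmod : PySem.Int.mod a d = 0
      · have hdvd : d ∣ a := (PySem.Int.mod_eq_zero_iff_dvd a d).mp hmod
        simp only [is_prime_loop, if_pos hd, if_pos hmod]
        constructor
        · intro h; cases h
        · intro h
          exact absurd hdvd (h d (le_refl d) hd (by omega))
      · have hndvd : ¬ d ∣ a := fun hc => hmod ((PySem.Int.mod_eq_zero_iff_dvd a d).mpr hc)
        have hrec := ih (d + i) (6 - i) (by omega) (by omega)
        simp only [is_prime_loop, if_pos hd, if_neg hmod]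
        rw [hrec]
        constructor
        · intro h m hdm hmmax hm6
          by_cases hcase : d + i ≤ m
          · exact h m hcase hmmax hm6
          · have : m = d := by omega
            exact this ▸ hndvd
        · intro h m hdm hmmax hm6
          exact h m (by omega) hmmax hm6
    · simp only [is_prime_loop, if_neg hd, true_iff]
      intro m hdm hmmax _
      omega

theorem is_prime_iff (a : Int) (h2 : 2 ≤ a) : (is_prime a = true ↔ Nat.Prime a.toNat) := by
  set A : Nat := a.toNat with hA
  have haA : a = (A : Int) := by omega
  by_cases ha23 : a = 2 ∨ a = 3
  · rcases ha23 with rfl | rfl <;> simp [is_prime] <;> decide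
  · have ha4 : 4 ≤ a := by omega
    have hA4 : 4 ≤ A := by omega
    by_cases hdv : PySem.Int.mod a 2 = 0 ∨ PySem.Int.mod a 3 = 0
    · -- divisible by 2 or 3 and ≥ 4: composite
      have : ¬ Nat.Prime A := by
        intro hp
        rcases hdv with h | h
        · have : (2 : Int) ∣ a := (PySem.Int.mod_eq_zero_iff_dvd a 2).mp h
          have h2A : 2 ∣ A := by
            rw [haA] at this; exact_mod_cast this
          rcases (Nat.Prime.eq_one_or_self_of_dvd hp 2 h2A) with h' | h' <;> omega
        · have : (3 : Int) ∣ a := (PySem.Int.mod_eq_zero_iff_dvd a 3).mp h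
          have h3A : 3 ∣ A := by
            rw [haA] at this; exact_mod_cast this
          rcases (Nat.Prime.eq_one_or_self_of_dvd hp 3 h3A) with h' | h'
          · omega
          · -- A = 3 contradicts 4 ≤ A
            omega
      simp only [is_prime, if_neg (by omega : ¬ a < 2)]
      rw [if_neg (by simp; omega), if_pos (by simpa using hdv)]
      simp [this]
    · rw [not_or] at hdv; obtain ⟨hdv1, hdv2⟩ := hdv; have hdv := And.intro hdv1 hdv2
      have hn2 : ¬ (2 : Int) ∣ a := fun hc => hdv.1 ((PySem.Int.mod_eq_zero_iff_dvd a 2).mpr hc)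
      have hn3 : ¬ (3 : Int) ∣ a := fun hc => hdv.2 ((PySem.Int.mod_eq_zero_iff_dvd a 3).mpr hc)
      have hn2A : ¬ 2 ∣ A := fun hc => hn2 (by rw [haA]; exact_mod_cast hc)
      have hn3A : ¬ 3 ∣ A := fun hc => hn3 (by rw [haA]; exact_mod_cast hc)
      have hchar := is_prime_loop_char a ((Nat.sqrt A : Nat) : Int) ((Nat.sqrt A) + 1) 5 2
        (by omega) (by omega)
      simp only [is_prime, if_neg (by omega : ¬ a < 2)]
      rw [if_neg (by simp; omega), if_neg (by simpa using hdv)]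
      rw [← hA]
      rw [show ((Nat.sqrt A : Nat) : Int).toNat = Nat.sqrt A from by simp, hchar]
      constructor
      · -- no wheel divisor up to sqrt ⇒ prime
        intro h
        by_contra hnp
        set q : Nat := A.minFac with hq
        have hqp : Nat.Prime q := Nat.minFac_prime (by omega)
        have hqd : q ∣ A := Nat.minFac_dvd A
        have hqsq : q * q ≤ A := by
          have := Nat.minFac_sq_le_self (by omega : 0 < A) hnp
          simpa [pow_two] using this
        have hq2 : ¬ 2 ∣ q := fun hc => hn2A (hc.trans hqd)
        have hq3 : ¬ 3 ∣ q := fun hc => hn3A (hc.trans hqd)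
        have hq5 : 5 ≤ q := by
          have := hqp.two_le
          omega
        have hqsqrt : q ≤ Nat.sqrt A := Nat.le_sqrt.mpr hqsq
        have hq6 : q % 6 = 1 ∨ q % 6 = 5 := by omega
        have : ¬ ((q : Int) ∣ a) := h (q : Int) (by omega) (by omega) (by omega)
        exact this (by rw [haA]; exact_mod_cast hqd)
      · -- prime ⇒ no wheel divisor up to sqrt
        intro hp m hm5 hmsqrt _ hmdvd
        rw [haA] at hmdvd
        have hmc : (m.toNat : Int) ∣ (A : Int) := by
          rwa [Int.toNat_of_nonneg (by omega : (0:Int) ≤ m)]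
        have hmA : m.toNat ∣ A := by exact_mod_cast hmc
        rcases (Nat.Prime.eq_one_or_self_of_dvd hp m.toNat hmA) with h' | h'
        · omega
        · -- m = A yet m ≤ sqrt A < A
          have hs : Nat.sqrt A < A := Nat.sqrt_lt_self (by omega)
          omega

-- ---- B side: the windowed sieve decides primality ----

-- invariant: m still unmarked after the passes of all trial divisors e < d
def WPd (d m : Int) : Prop := 2 ≤ m ∧ ∀ e : Int, 2 ≤ e → e < d → e * e ≤ m → ¬ e ∣ m

theorem wpd_iff_prime (d m : Int) (h2 : 2 ≤ m)
    (h : ∀ e : Int, 2 ≤ e → e * e ≤ m → e < d) : WPd d m ↔ Nat.Prime m.toNat := by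
  have hmM : m = ((m.toNat : Nat) : Int) := by omega
  constructor
  · rintro ⟨hm2, hno⟩
    by_contra hnp
    have hq : Nat.Prime m.toNat.minFac := Nat.minFac_prime (by omega)
    have hqs : m.toNat.minFac * m.toNat.minFac ≤ m.toNat := by
      have := Nat.minFac_sq_le_self (by omega : 0 < m.toNat) hnp
      simpa [pow_two] using this
    have hqd : m.toNat.minFac ∣ m.toNat := Nat.minFac_dvd m.toNat
    have he2 : (2 : Int) ≤ (m.toNat.minFac : Int) := by exact_mod_cast hq.two_le
    have hes : ((m.toNat.minFac : Nat) : Int) * ((m.toNat.minFac : Nat) : Int) ≤ m := by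
      rw [hmM]; exact_mod_cast hqs
    refine hno (m.toNat.minFac : Int) he2 (h _ he2 hes) hes ?_
    rw [hmM]; exact_mod_cast hqd
  · intro hp
    refine ⟨h2, ?_⟩
    intro e he2 _ hes hed
    rw [hmM] at hed
    have hec : ((e.toNat : Nat) : Int) ∣ ((m.toNat : Nat) : Int) := by
      rwa [Int.toNat_of_nonneg (by omega : (0:Int) ≤ e)]
    have heA : e.toNat ∣ m.toNat := by exact_mod_cast hec
    rcases hp.eq_one_or_self_of_dvd e.toNat heA with h' | h'
    · omega
    · -- e = m yet e * e ≤ m forces m ≤ 1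
      have : e = m := by omega
      subst this
      nlinarith

theorem window_mark_size (lo : Int) (ms : List Int) (arr : Array Bool) :
    (window_mark lo arr ms).size = arr.size := by
  induction ms generalizing arr with
  | nil => rfl
  | cons m ms ih =>
    show (window_mark lo (arr.setIfInBounds (m - lo).toNat false) ms).size = arr.size
    rw [ih, Array.size_setIfInBounds]

theorem window_mark_getD_of_not (lo : Int) (ms : List Int) (arr : Array Bool) (j : Nat)
    (h : ∀ m ∈ ms, (m - lo).toNat ≠ j) :
    (window_mark lo arr ms).getD j false = arr.getD j false := by
  induction ms generalizing arr with
  | nil => rfl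
  | cons m ms ih =>
    have hne : (m - lo).toNat ≠ j := h m (List.mem_cons_self ..)
    have := ih (arr.setIfInBounds (m - lo).toNat false) (fun m' hm' => h m' (List.mem_cons_of_mem _ hm'))
    simp only [window_mark, List.foldl_cons] at this ⊢
    rw [this, Array.getD_eq_getD_getElem?, Array.getD_eq_getD_getElem?,
      Array.getElem?_setIfInBounds, if_neg hne]

theorem window_mark_getD_of_mem (lo : Int) (ms : List Int) (arr : Array Bool) (j : Nat)
    (h : ∃ m ∈ ms, (m - lo).toNat = j) (hj : j < arr.size) :
    (window_mark lo arr ms).getD j false = false := by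
  obtain ⟨m, hm, hmj⟩ := h
  -- once an entry is false it stays false through further `setIfInBounds … false`
  have mono : ∀ (ms : List Int) (arr : Array Bool), arr.getD j false = false →
      (window_mark lo arr ms).getD j false = false := by
    intro ms
    induction ms with
    | nil => intro arr h0; exact h0
    | cons m' ms ih =>
      intro arr h0
      simp only [window_mark, List.foldl_cons]
      apply ih
      rw [Array.getD_eq_getD_getElem?, Array.getElem?_setIfInBounds]
      rw [Array.getD_eq_getD_getElem?] at h0
      split_ifs with h1 h2
      · rfl
      · simp
      · exact h0
  induction ms generalizing arr with
  | nil => cases hm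
  | cons m' ms ih =>
    simp only [window_mark, List.foldl_cons]
    rcases List.mem_cons.mp hm with rfl | hm'
    · apply mono
      rw [Array.getD_eq_getD_getElem?, Array.getElem?_setIfInBounds, if_pos hmj,
        if_pos (hmj ▸ hj)]
      rfl
    · exact ih (arr.setIfInBounds (m' - lo).toNat false) (by simpa using hj) hm'

-- ((lo + d - 1) // d) * d is the least multiple of d that is ≥ lo
theorem ceil_mul_facts (lo d : Int) (hd : 0 < d) :
    lo ≤ PySem.Int.floordiv (lo + d - 1) d * d ∧
    PySem.Int.floordiv (lo + d - 1) d * d < lo + d ∧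
    d ∣ PySem.Int.floordiv (lo + d - 1) d * d := by
  have h1 : PySem.Int.floordiv (lo + d - 1) d * d ≤ lo + d - 1 :=
    (PySem.Int.le_floordiv_iff_mul_le hd).mp (le_refl _)
  have h2 : lo + d - 1 < (PySem.Int.floordiv (lo + d - 1) d + 1) * d :=
    (PySem.Int.floordiv_lt_iff_lt_mul hd).mp (by omega)
  have h3 : (PySem.Int.floordiv (lo + d - 1) d + 1) * d =
      PySem.Int.floordiv (lo + d - 1) d * d + d := by ring
  exact ⟨by omega, by omega, dvd_mul_left d _⟩

theorem window_loop_inv (lo hi : Int) (h2lo : 2 ≤ lo) :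
    ∀ (fuel : Nat) (d : Int) (arr : Array Bool), 2 ≤ d →
    arr.size = (hi - lo).toNat →
    (∀ j : Nat, j < (hi - lo).toNat → (arr.getD j false = true ↔ WPd d (lo + (j:Int)))) →
    hi ≤ d + fuel →
    ∀ j : Nat, j < (hi - lo).toNat →
      ((window_loop lo hi d arr fuel).getD j false = true ↔ Nat.Prime (lo + (j:Int)).toNat) := by
  intro fuel
  induction fuel with
  | zero =>
    intro d arr hd2 _ hinv hfuel j hj
    rw [show window_loop lo hi d arr 0 = arr from rfl, hinv j hj]
    apply wpd_iff_prime d (lo + (j:Int)) (by omega)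
    intro e he2 hes
    have hlt : lo + (j:Int) < hi := by omega
    have hd : hi ≤ d := by omega
    nlinarith [mul_nonneg (by omega : (0:Int) ≤ e - 2) (by omega : (0:Int) ≤ e)]
  | succ fuel ih =>
    intro d arr hd2 hlen hinv hfuel j hj
    simp only [window_loop]
    by_cases hg : d * d < hi
    · rw [if_pos hg]
      obtain ⟨hc1, hc2, hc3⟩ := ceil_mul_facts lo d (by omega)
      have hstart_dvd : d ∣ max (d * d) (PySem.Int.floordiv (lo + d - 1) d * d) := by
        rcases max_choice (d * d) (PySem.Int.floordiv (lo + d - 1) d * d) with h | h <;> rw [h]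
        · exact Dvd.intro d rfl
        · exact hc3
      apply ih (d + 1) _ (by omega) (by rw [window_mark_size]; exact hlen) ?_ (by omega) j hj
      intro k hk
      by_cases hmem : d ∣ (lo + (k:Int)) ∧ d * d ≤ lo + (k:Int)
      · -- lo + k is marked in this pass, and WPd (d+1) fails at e = d
        have hstart_le : max (d * d) (PySem.Int.floordiv (lo + d - 1) d * d) ≤ lo + (k:Int) := by
          rcases hmem with ⟨hdvd, hsq⟩
          refine max_le hsq ?_
          -- the least multiple of d ≥ lo is ≤ any multiple of d that is ≥ lo
          by_contra hlt
          obtain ⟨u, hu⟩ := hc3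
          obtain ⟨v, hv⟩ := hdvd
          have huv : v < u := by
            apply lt_of_mul_lt_mul_left _ (by omega : (0:Int) ≤ d)
            omega
          have : d * (v + 1) ≤ d * u := by
            apply mul_le_mul_of_nonneg_left (by omega) (by omega)
          have hexp : d * (v + 1) = d * v + d := by ring
          omega
        have hmark : (window_mark lo arr
            (PySem.List.pyRange (max (d * d) (PySem.Int.floordiv (lo + d - 1) d * d)) hi d)).getD
              k false = false := by
          apply window_mark_getD_of_mem
          · refine ⟨lo + (k:Int), ?_, by omega⟩
            rw [PySem.List.mem_pyRange_iff_of_pos (by omega : (0:Int) < d)]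
            exact ⟨hstart_le, by omega, (Int.dvd_sub hmem.1 hstart_dvd)⟩
          · omega
        have hnpd : ¬ WPd (d + 1) (lo + (k:Int)) :=
          fun ⟨_, hall⟩ => hall d hd2 (by omega) hmem.2 hmem.1
        rw [hmark]
        simp [hnpd]
      · -- lo + k is untouched by this pass, and the new clause e = d is vacuous
        have hmark : (window_mark lo arr
            (PySem.List.pyRange (max (d * d) (PySem.Int.floordiv (lo + d - 1) d * d)) hi d)).getD
              k false = arr.getD k false := by
          apply window_mark_getD_of_not
          intro m hm hmk
          rw [PySem.List.mem_pyRange_iff_of_pos (by omega : (0:Int) < d)] at hm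
          obtain ⟨hm1, hm2, hm3⟩ := hm
          apply hmem
          have hmlo : lo ≤ m := le_trans hc1 (le_trans (le_max_right _ _) hm1)
          have hmval : m = lo + (k:Int) := by omega
          have hdm : d ∣ m := by
            have h' := Int.dvd_add hm3 hstart_dvd
            rwa [sub_add_cancel] at h' 
          constructor
          · rwa [← hmval]
          · calc d * d ≤ max (d * d) _ := le_max_left _ _
              _ ≤ m := hm1
              _ = lo + (k:Int) := hmval
        rw [hmark, hinv k hk]
        constructor
        · rintro ⟨h2k, hall⟩
          refine ⟨h2k, ?_⟩
          intro e he2 helt hes hed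
          rcases lt_or_ge e d with h' | h'
          · exact hall e he2 h' hes hed
          · have : e = d := by omega
            subst this
            exact hmem ⟨hed, hes⟩
        · rintro ⟨h2k, hall⟩
          exact ⟨h2k, fun e he2 helt hes hed => hall e he2 (by omega) hes hed⟩
    · rw [if_neg hg]
      rw [hinv j hj]
      apply wpd_iff_prime d (lo + (j:Int)) (by omega)
      intro e he2 hes
      by_contra hde
      have : d * d ≤ e * e := by nlinarith
      omega

theorem window_flags_getD (lo hi : Int) (h2lo : 2 ≤ lo) (j : Nat)
    (hj : j < (hi - lo).toNat) :
    ((window_flags lo hi).getD j false = true ↔ Nat.Prime (lo + (j:Int)).toNat) := by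
  apply window_loop_inv lo hi h2lo hi.toNat 2 (window_init lo hi) (by omega) ?_ ?_ (by omega) j hj
  · rw [window_init, List.size_toArray, List.length_map, PySem.List.length_pyRange_one]
  · intro k hk
    have hgd : (window_init lo hi).getD k false = decide (2 ≤ lo + (k:Int)) := by
      rw [window_init, PySem.List.pyRange_one, List.map_map, Array.getD_eq_getD_getElem?,
        List.getElem?_toArray, List.getElem?_map,
        List.getElem?_range (by omega : k < (hi - lo).toNat)]
      simp
    rw [hgd]
    constructor
    · intro h
      exact ⟨by simpa using h, fun e he2 helt _ _ => by omega⟩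
    · rintro ⟨h2k, _⟩
      simpa using h2k

theorem window_pred_agree (lo hi m : Int) (h2lo : 2 ≤ lo) (hmlo : lo ≤ m) (hmhi : m < hi) :
    is_prime m = (window_flags lo hi).getD (m - lo).toNat false := by
  rw [← Bool.coe_iff_coe, is_prime_iff m (by omega),
    window_flags_getD lo hi h2lo (m - lo).toNat (by omega),
    show lo + (((m - lo).toNat : Nat) : Int) = m by omega]

-- a first-hit scan only depends on the predicate's values on the scanned list
theorem find?_congr (f g : Int → Bool) :
    ∀ l : List Int, (∀ x ∈ l, f x = g x) → l.find? f = l.find? g := by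
  intro l
  induction l with
  | nil => intro _; rfl
  | cons x xs ih =>
    intro h
    rw [List.find?_cons, List.find?_cons, h x (List.mem_cons_self ..),
      ih (fun y hy => h y (List.mem_cons_of_mem _ hy))]

theorem bef_loop_eq :
    ∀ (fuel : Nat) (hi : Int), hi ≤ 2 + (fuel : Int) →
    bef_loop 1024 hi fuel = (PySem.List.pyRange (hi - 1) 1 (-1)).find? (fun m => is_prime m) := by
  intro fuel
  induction fuel with
  | zero =>
    intro hi h
    rw [show bef_loop 1024 hi 0 = none from rfl,
      PySem.List.pyRange_neg_one_eq_nil (by omega : hi - 1 ≤ 1)]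
    rfl
  | succ fuel ih =>
    intro hi h
    by_cases hhi : 2 < hi
    · have hsplit : PySem.List.pyRange (hi - 1) 1 (-1) =
          PySem.List.pyRange (hi - 1) (max 2 (hi - 1024) - 1) (-1) ++
            PySem.List.pyRange (max 2 (hi - 1024) - 1) 1 (-1) := by
        rw [PySem.List.pyRange_neg_one_eq_reverse (hi - 1) 1,
          PySem.List.pyRange_neg_one_eq_reverse (hi - 1) (max 2 (hi - 1024) - 1),
          PySem.List.pyRange_neg_one_eq_reverse (max 2 (hi - 1024) - 1) 1,
          show (1:Int) + 1 = 2 by ring, show hi - 1 + 1 = hi by ring,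
          show max 2 (hi - 1024) - 1 + 1 = max 2 (hi - 1024) by ring,
          PySem.List.pyRange_one_append 2 (max 2 (hi - 1024)) hi (by omega) (by omega),
          List.reverse_append]
      have hcong : (PySem.List.pyRange (hi - 1) (max 2 (hi - 1024) - 1) (-1)).find?
            (fun m => (window_flags (max 2 (hi - 1024)) hi).getD (m - max 2 (hi - 1024)).toNat false)
          = (PySem.List.pyRange (hi - 1) (max 2 (hi - 1024) - 1) (-1)).find? (fun m => is_prime m) := by
        apply find?_congr
        intro x hx
        rw [PySem.List.mem_pyRange_neg_one] at hx
        exact (window_pred_agree (max 2 (hi - 1024)) hi x (le_max_left ..) (by omega) (by omega)).symm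
      simp only [bef_loop]
      rw [if_pos hhi, hcong, hsplit, List.find?_append]
      cases hfind : (PySem.List.pyRange (hi - 1) (max 2 (hi - 1024) - 1) (-1)).find?
          (fun m => is_prime m) with
      | some m => simp
      | none =>
        rw [ih (max 2 (hi - 1024)) (by omega)]
        simp
    · simp only [bef_loop]
      rw [if_neg hhi, PySem.List.pyRange_neg_one_eq_nil (by omega : hi - 1 ≤ 1)]
      rfl

theorem aft_loop_eq (bound : Int) :
    ∀ (fuel : Nat) (lo : Int), bound ≤ lo + (fuel : Int) → (2 ≤ lo ∨ bound ≤ lo) →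
    aft_loop 1024 bound lo fuel = (PySem.List.pyRange lo bound 1).find? (fun m => is_prime m) := by
  intro fuel
  induction fuel with
  | zero =>
    intro lo h _
    rw [show aft_loop 1024 bound lo 0 = none from rfl,
      PySem.List.pyRange_one_eq_nil (by omega : bound ≤ lo)]
    rfl
  | succ fuel ih =>
    intro lo h hside
    by_cases hlo : lo < bound
    · have h2lo : 2 ≤ lo := by omega
      have hsplit : PySem.List.pyRange lo bound 1 =
          PySem.List.pyRange lo (min bound (lo + 1024)) 1 ++
            PySem.List.pyRange (min bound (lo + 1024)) bound 1 :=
        PySem.List.pyRange_one_append lo (min bound (lo + 1024)) bound (by omega) (by omega)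
      have hcong : (PySem.List.pyRange lo (min bound (lo + 1024)) 1).find?
            (fun m => (window_flags lo (min bound (lo + 1024))).getD (m - lo).toNat false)
          = (PySem.List.pyRange lo (min bound (lo + 1024)) 1).find? (fun m => is_prime m) := by
        apply find?_congr
        intro x hx
        rw [PySem.List.mem_pyRange_one] at hx
        exact (window_pred_agree lo (min bound (lo + 1024)) x h2lo (by omega) (by omega)).symm
      simp only [aft_loop]
      rw [if_pos hlo, hcong, hsplit, List.find?_append]
      cases hfind : (PySem.List.pyRange lo (min bound (lo + 1024)) 1).find?
          (fun m => is_prime m) with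
      | some m => simp
      | none =>
        rw [ih (min bound (lo + 1024)) (by omega) (by omega)]
        simp
    · simp only [aft_loop]
      rw [if_neg hlo, PySem.List.pyRange_one_eq_nil (by omega : bound ≤ lo)]
      rfl

-- ---- putting the two characterizations together ----

theorem scan_down_eq_find? (g : Int → Bool) :
    ∀ (fuel : Nat) (num : Int), fuel = (num - 1).toNat →
    (∀ x : Int, 1 < x → x ≤ num → is_prime x = g x) →
    scan_down num fuel = (PySem.List.pyRange num 1 (-1)).find? g := by
  intro fuel
  induction fuel with
  | zero =>
    intro num hf _
    rw [show scan_down num 0 = none from rfl,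
      PySem.List.pyRange_neg_one_eq_nil (by omega : num ≤ 1)]
    rfl
  | succ fuel ih =>
    intro num hf hagree
    rw [PySem.List.pyRange_neg_one_cons (by omega : (1:Int) < num), List.find?_cons]
    rw [show scan_down num (fuel + 1) =
      (if is_prime num then some num else scan_down (num - 1) fuel) from rfl]
    rw [hagree num (by omega) (le_refl num)]
    split <;> rename_i hg
    · rw [hg]
    · rw [Bool.not_eq_true] at hg
      rw [hg]
      exact ih (num - 1) (by omega) (fun x h1 h2 => hagree x h1 (by omega))

theorem scan_up_eq_find? (g : Int → Bool) (b : Int) :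
    ∀ (fuel : Nat) (num : Int), fuel = (b - num).toNat →
    (∀ x : Int, num ≤ x → x < b → is_prime x = g x) →
    scan_up num fuel = (PySem.List.pyRange num b 1).find? g := by
  intro fuel
  induction fuel with
  | zero =>
    intro num hf _
    rw [show scan_up num 0 = none from rfl,
      PySem.List.pyRange_one_eq_nil (by omega : b ≤ num)]
    rfl
  | succ fuel ih =>
    intro num hf hagree
    rw [PySem.List.pyRange_one_cons (by omega : num < b), List.find?_cons]
    rw [show scan_up num (fuel + 1) =
      (if is_prime num then some num else scan_up (num + 1) fuel) from rfl]
    rw [hagree num (le_refl num) (by omega)]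
    split <;> rename_i hg
    · rw [hg]
    · rw [Bool.not_eq_true] at hg
      rw [hg]
      exact ih (num + 1) (by omega) (fun x h1 h2 => hagree x (by omega) h2)

-- ===== VERDICT (by name: the statement is the Claim_ definition above) =====
theorem find_prime_neighbors_spec : Claim_equal_find_prime_neighbors := by
  intro n _
  unfold Spec_find_prime_neighbors find_prime_neighbors find_prime_neighbors_alt
  have hA1 : scan_down (n - 1) ((n - 1 - 1).toNat) =
      (PySem.List.pyRange (n - 1) 1 (-1)).find? (fun m => is_prime m) :=
    scan_down_eq_find? (fun m => is_prime m) ((n - 1 - 1).toNat) (n - 1) (by omega)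
      (fun x _ _ => rfl)
  have hA2 : scan_up (n + 1) ((3 * n - (n + 1)).toNat) =
      (PySem.List.pyRange (n + 1) (3 * n) 1).find? (fun m => is_prime m) :=
    scan_up_eq_find? (fun m => is_prime m) (3 * n) ((3 * n - (n + 1)).toNat) (n + 1) (by omega)
      (fun x _ _ => rfl)
  have hB1 : bef_loop 1024 n n.toNat =
      (PySem.List.pyRange (n - 1) 1 (-1)).find? (fun m => is_prime m) :=
    bef_loop_eq n.toNat n (by omega)
  have hB2 : aft_loop 1024 (3 * n) (n + 1) (3 * n).toNat =
      (PySem.List.pyRange (n + 1) (3 * n) 1).find? (fun m => is_prime m) :=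
    aft_loop_eq (3 * n) (3 * n).toNat (n + 1) (by omega) (by omega)
  simp only [hA1, hA2, hB1, hB2]
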